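-- pv_equiv track=rewrite | github.com/jaeyo03/CodingTest | Exhaustive Search/programmers_92342.py | solution
-- ===== SOURCE A (Python) =====
-- from itertools import combinations
--
-- def solution(n, info):
--     answer = []
--     max_point = 0
--
--     for i in range(1, 12):
--         for combi in combinations(list(range(11)), i):  # 하나의 조합
--             total_arrows = n
--             result = [0] * 11
--             success = True
--             for i in combi:
--                 need_arrows = info[i] + 1
--                 if need_arrows > total_arrows:
--                     success = False
--                     break
--                 else:
--                     total_arrows -= need_arrows
--                     result[i] = need_arrows
--
--             # 화살 다 안 썼으면 , 남은 화살은 0 점에 버리기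
--             if total_arrows > 0:
--                 result[10] = total_arrows
--
--             # 화살도 다 쓰고 가능한 경우라면
--             if success:
--                 lion = 0
--                 peach = 0
--                 # 점수 계산
--                 for i in range(11):
--                     if result[i] > info[i]:
--                         lion += 10 - i
--                     elif info[i] >= result[i] and info[i] != 0:
--                         peach += 10 - i
--                 if lion > peach and (lion - peach) >= max_point:
--                     max_point = lion - peach
--                     answer.append((result, lion - peach))
--             else:
--                 continue
--
--     # answer.sort(key = lambda x : (x[1],x[0][10],x[0][9],x[0][8],x[0][7],x[0][6],x[0][5],x[0][4],x[0][3],x[0][2],x[0][1],x[0][0]),reverse=True)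
--     answer.sort(key=lambda x: (x[1], x[0][::-1]), reverse=True)
--
--     if len(answer) == 0:
--         answer = [-1]
--     else:
--         answer = answer[0][0]
--
--     return answer
-- ===== SOURCE B (Python) =====
-- def solution(n, info):
--     best = None  # (key, shots) with key = (margin, shots[::-1]); argmax under tuple order
--
--     def score(res):
--         lion = sum(10 - i for i in range(11) if res[i] > info[i])
--         peach = sum(10 - i for i in range(11) if info[i] >= res[i] and info[i] != 0)
--         return lion, peach
--
--     def dfs(zones, remaining, result, hit):
--         nonlocal best
--         if not zones:
--             if not hit:          # lion must contest at least one zone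
--                 return
--             res = result[:]
--             if remaining > 0:
--                 res[10] = remaining  # dump leftover arrows on the 0-point zone
--             lion, peach = score(res)
--             if lion > peach:
--                 key = (lion - peach, res[::-1])
--                 if best is None or key > best[0]:
--                     best = (key, res)
--             return
--         z = zones[0]
--         dfs(zones[1:], remaining, result, hit)     # lion skips zone z
--         need = info[z] + 1
--         if need <= remaining:                      # lion takes zone z
--             taken = result[:]
--             taken[z] = need
--             dfs(zones[1:], remaining - need, taken, True)
--
--     dfs(list(range(11)), n, [0] * 11, False)
--     return best[1] if best is not None else [-1]
-- ===== Notes on version B (the rewrite author's own statement) =====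
-- stated objective: alternative
-- what changed: Replaces the size-by-size itertools.combinations enumeration with collect/filter/sort selection by a recursive take/skip DFS over the 11 zones that keeps a single running best allocation under the (margin, reversed-shots) key, so no candidate list is ever built or sorted.
import Mathlib
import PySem

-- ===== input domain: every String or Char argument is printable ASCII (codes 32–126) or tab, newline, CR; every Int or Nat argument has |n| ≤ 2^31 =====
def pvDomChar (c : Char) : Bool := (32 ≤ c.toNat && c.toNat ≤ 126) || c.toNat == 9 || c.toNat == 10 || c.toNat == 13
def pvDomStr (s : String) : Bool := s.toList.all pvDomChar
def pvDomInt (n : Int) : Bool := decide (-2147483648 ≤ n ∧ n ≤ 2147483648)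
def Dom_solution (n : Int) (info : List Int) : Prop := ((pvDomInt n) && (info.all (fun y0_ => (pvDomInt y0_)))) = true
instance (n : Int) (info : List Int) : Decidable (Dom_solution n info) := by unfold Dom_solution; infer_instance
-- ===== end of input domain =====

-- B replaces A's size-by-size combinations enumeration + collect/filter/sort selection by a
-- take/skip DFS over the 11 zones keeping one running best under the (margin, reversed-shots) key.

-- ===== PORT A =====
-- the inner 'for i in combi' loop: state (total_arrows, result, success), break = early return
def solTakeLoop (info : List Int) : List Int → Int → List Int → Int × List Int × Bool
  | [], total, result => (total, result, true)
  | i :: rest, total, result =>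
    let need := PySem.List.pyGetD info i 0 + 1
    if need > total then (total, result, false)
    else solTakeLoop info rest (total - need) (PySem.List.pySetD result i need)

-- the 'for i in range(11)' scoring loop, accumulating (lion, peach)
def solScore (info result : List Int) : Int × Int :=
  (PySem.List.pyRange 0 11 1).foldl
    (fun lp i =>
      if PySem.List.pyGetD result i 0 > PySem.List.pyGetD info i 0 then (lp.1 + (10 - i), lp.2)
      else if PySem.List.pyGetD info i 0 ≥ PySem.List.pyGetD result i 0 ∧ PySem.List.pyGetD info i 0 ≠ 0 then
        (lp.1, lp.2 + (10 - i))
      else lp)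
    (0, 0)

-- one iteration of the 'for combi in combinations(...)' body, state (answer, max_point)
def solStep (n : Int) (info : List Int) (st : List (List Int × Int) × Int) (combi : List Int) :
    List (List Int × Int) × Int :=
  let r := solTakeLoop info combi n (List.replicate 11 0)
  let result := if r.1 > 0 then PySem.List.pySetD r.2.1 10 r.1 else r.2.1
  if r.2.2 then
    let lp := solScore info result
    if lp.1 > lp.2 ∧ lp.1 - lp.2 ≥ st.2 then (st.1 ++ [(result, lp.1 - lp.2)], lp.1 - lp.2)
    else st
  else st

def solution (n : Int) (info : List Int) : List Int :=
  let st := (PySem.List.pyRange 1 12 1).foldl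
    (fun st i =>
      (PySem.List.combinations (PySem.List.pyRange 0 11 1) i.toNat).foldl (solStep n info) st)
    ([], 0)
  -- Python's tuple/list comparison in the sort key (x[1], x[0][::-1]) is the
  -- lexicographic order, i.e. the order of Lex (Int × List Int)
  let answer := PySem.List.sorted st.1 (fun x => toLex (x.2, x.1.reverse)) true
  match answer with
  | [] => [-1]
  | a :: _ => a.1

-- ===== PORT B =====
-- lion / peach as two independent comprehension sums over range(11)
def altScore (info res : List Int) : Int × Int :=
  ((((PySem.List.pyRange 0 11 1).filter
      (fun i => decide (PySem.List.pyGetD res i 0 > PySem.List.pyGetD info i 0))).map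
      (fun i => 10 - i)).sum,
   (((PySem.List.pyRange 0 11 1).filter
      (fun i => decide (PySem.List.pyGetD info i 0 ≥ PySem.List.pyGetD res i 0 ∧
                        PySem.List.pyGetD info i 0 ≠ 0))).map
      (fun i => 10 - i)).sum)

-- the leaf of the DFS: dump leftover arrows on zone 10, score, keep the running best
def altLeaf (info : List Int) (remaining : Int) (result : List Int)
    (best : Option ((Int × List Int) × List Int)) : Option ((Int × List Int) × List Int) :=
  let res := if remaining > 0 then PySem.List.pySetD result 10 remaining else result
  let lp := altScore info res
  if lp.1 > lp.2 then
    let key := (lp.1 - lp.2, res.reverse)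
    match best with
    | none => some (key, res)
    | some b => if toLex b.1 < toLex key then some (key, res) else some b
  else best

-- take/skip recursion over the remaining zones; hit records whether any zone was taken
def altDfs (info : List Int) : List Int → Int → List Int → Bool →
    Option ((Int × List Int) × List Int) → Option ((Int × List Int) × List Int)
  | [], remaining, result, hit, best =>
    if hit then altLeaf info remaining result best else best
  | z :: zs, remaining, result, hit, best =>
    let best1 := altDfs info zs remaining result hit best
    let need := PySem.List.pyGetD info z 0 + 1
    if need ≤ remaining then
      altDfs info zs (remaining - need) (PySem.List.pySetD result z need) true best1
    else best1

def solution_alt (n : Int) (info : List Int) : List Int :=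
  match altDfs info (PySem.List.pyRange 0 11 1) n (List.replicate 11 0) false none with
  | some b => b.2
  | none => [-1]

-- ===== PRECONDITION & SPEC =====
-- Pre_ excludes exactly the info lists with fewer than 11 entries: A indexes info[0..10]
-- and raises IndexError there.
def Pre_solution (_n : Int) (info : List Int) : Prop := 11 ≤ info.length
instance (n : Int) (info : List Int) : Decidable (Pre_solution n info) := by
  unfold Pre_solution; infer_instance

def pvWitness_solution : Int × List Int := (5, [2, 1, 1, 1, 0, 0, 0, 0, 0, 0, 0])

def Spec_solution (n : Int) (info : List Int) (out : List Int) : Prop := out = solution_alt n info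
instance (n : Int) (info : List Int) (out : List Int) : Decidable (Spec_solution n info out) := by
  unfold Spec_solution; infer_instance

-- ===== CLAIM (what is proved, stated in full; the proofs are below) =====
def Claim_equal_solution : Prop :=
  ∀ (n : Int) (info : List Int), Dom_solution n info → Pre_solution n info →
    Spec_solution n info (solution n info)

-- ===== LEMMAS AND PROOFS =====

-- leftover arrows dumped on zone 10
def fixRes (rem : Int) (res0 : List Int) : List Int :=
  if rem > 0 then PySem.List.pySetD res0 10 rem else res0

-- the candidate a DFS leaf (remaining, result) produces (none unless lion wins)
def candLeaf (info : List Int) (rem : Int) (res0 : List Int) : Option (List Int × Int) :=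
  if (solScore info (fixRes rem res0)).1 > (solScore info (fixRes rem res0)).2 then
    some (fixRes rem res0, (solScore info (fixRes rem res0)).1 - (solScore info (fixRes rem res0)).2)
  else none

-- the candidate a chosen zone subset S produces (none unless feasible and lion wins)
def candOf (n : Int) (info : List Int) (S : List Int) : Option (List Int × Int) :=
  if (solTakeLoop info S n (List.replicate 11 0)).2.2 then
    candLeaf info (solTakeLoop info S n (List.replicate 11 0)).1
      (solTakeLoop info S n (List.replicate 11 0)).2.1
  else none

def keyC (c : List Int × Int) : Lex (Int × List Int) := toLex (c.2, c.1.reverse)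
def liftC (c : List Int × Int) : (Int × List Int) × List Int := ((c.2, c.1.reverse), c.1)

-- the leaves the DFS scores, in visit order
def leavesRec (info : List Int) : List Int → Int → List Int → Bool → List (Int × List Int)
  | [], rem, res, hit => if hit then [(rem, res)] else []
  | z :: zs, rem, res, hit =>
    leavesRec info zs rem res hit ++
      (if PySem.List.pyGetD info z 0 + 1 ≤ rem then
        leavesRec info zs (rem - (PySem.List.pyGetD info z 0 + 1))
          (PySem.List.pySetD res z (PySem.List.pyGetD info z 0 + 1)) true
      else [])

def LallL : List (List Int) :=
  (PySem.List.pyRange 1 12 1).flatMap (fun i => PySem.List.combinations (PySem.List.pyRange 0 11 1) i.toNat)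

theorem score_eq (info res : List Int) : solScore info res = altScore info res := by
  unfold solScore altScore
  rw [PySem.List.foldl_congr_mem _ _
    (fun lp (i : Int) =>
      ((fun (a : Int) (i : Int) =>
          if PySem.List.pyGetD res i 0 > PySem.List.pyGetD info i 0 then a + (10 - i) else a) lp.1 i,
       (fun (a : Int) (i : Int) =>
          if PySem.List.pyGetD info i 0 ≥ PySem.List.pyGetD res i 0 ∧ PySem.List.pyGetD info i 0 ≠ 0 then
            a + (10 - i) else a) lp.2 i)) _
    (by
      intro acc x _
      simp only []
      split_ifs with h1 h2 h3 <;> first | rfl | (exfalso; omega))]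
  beta_reduce
  rw [PySem.List.foldl_prod_mk
        (f := fun (a : Int) (i : Int) =>
          if PySem.List.pyGetD res i 0 > PySem.List.pyGetD info i 0 then a + (10 - i) else a)
        (g := fun (a : Int) (i : Int) =>
          if PySem.List.pyGetD info i 0 ≥ PySem.List.pyGetD res i 0 ∧ PySem.List.pyGetD info i 0 ≠ 0 then
            a + (10 - i) else a)]
  rw [PySem.List.foldl_ite_eq_foldl_filter
        (fun (i : Int) => PySem.List.pyGetD res i 0 > PySem.List.pyGetD info i 0)
        (fun (a : Int) (i : Int) => a + (10 - i)),
      PySem.List.foldl_ite_eq_foldl_filter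
        (fun (i : Int) => PySem.List.pyGetD info i 0 ≥ PySem.List.pyGetD res i 0 ∧
          PySem.List.pyGetD info i 0 ≠ 0)
        (fun (a : Int) (i : Int) => a + (10 - i)),
      PySem.List.foldl_add, PySem.List.foldl_add, zero_add, zero_add]

theorem altLeaf_eq (info : List Int) (rem : Int) (res0 : List Int)
    (best : Option ((Int × List Int) × List Int)) :
    altLeaf info rem res0 best =
      match candLeaf info rem res0 with
      | none => best
      | some c => match best with
        | none => some (liftC c)
        | some b => if toLex b.1 < keyC c then some (liftC c) else some b := by
  cases best with
  | none =>
    simp only [altLeaf, candLeaf, fixRes, liftC, keyC, ← score_eq]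
    split_ifs <;> first | rfl | simp_all
  | some b =>
    simp only [altLeaf, candLeaf, fixRes, liftC, keyC, ← score_eq]
    split_ifs <;> first | rfl | simp_all

theorem dfs_eq_foldl (info : List Int) (zs : List Int) (rem : Int) (res : List Int) (hit : Bool)
    (best : Option ((Int × List Int) × List Int)) :
    altDfs info zs rem res hit best =
      (leavesRec info zs rem res hit).foldl (fun b l => altLeaf info l.1 l.2 b) best := by
  induction zs generalizing rem res hit best with
  | nil => cases hit <;> rfl
  | cons z zs ih =>
    by_cases h : PySem.List.pyGetD info z 0 + 1 ≤ rem <;>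
      simp [altDfs, leavesRec, h, List.foldl_append, ih]

theorem mem_leaves (info : List Int) (zs : List Int) (rem : Int) (res : List Int) (hit : Bool)
    (rem' : Int) (res' : List Int) :
    (rem', res') ∈ leavesRec info zs rem res hit ↔
      ∃ S, S.Sublist zs ∧ (hit = true ∨ S ≠ []) ∧ solTakeLoop info S rem res = (rem', res', true) := by
  induction zs generalizing rem res hit with
  | nil =>
    cases hit <;> simp only [leavesRec]
    · constructor
      · intro h
        simp at h
      · rintro ⟨S, hS, hne, hT⟩
        rw [List.sublist_nil.mp hS] at hne
        simp at hne
    · simp only [if_true, List.mem_singleton]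
      constructor
      · intro h
        rw [Prod.mk.injEq] at h
        exact ⟨[], List.Sublist.refl _, Or.inl trivial, by simp [solTakeLoop, h.1, h.2]⟩
      · rintro ⟨S, hS, _, hT⟩
        rw [List.sublist_nil.mp hS] at hT
        simp only [solTakeLoop, Prod.mk.injEq] at hT
        simp [hT.1, hT.2.1]
  | cons z zs ih =>
    simp only [leavesRec]
    constructor
    · intro h
      rcases List.mem_append.mp h with h1 | h2
      · obtain ⟨S, hS, hne, hT⟩ := (ih _ _ _).mp h1
        exact ⟨S, hS.cons _, hne, hT⟩
      · by_cases hle : PySem.List.pyGetD info z 0 + 1 ≤ rem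
        · rw [if_pos hle] at h2
          obtain ⟨S, hS, _, hT⟩ := (ih _ _ _).mp h2
          refine ⟨z :: S, hS.cons₂ _, Or.inr (by simp), ?_⟩
          simp only [solTakeLoop]
          rw [if_neg (by omega)]
          exact hT
        · rw [if_neg hle] at h2
          simp at h2
    · rintro ⟨S, hS, hne, hT⟩
      rcases List.sublist_cons_iff.mp hS with hS' | ⟨r, rfl, hr⟩
      · exact List.mem_append_left _ ((ih _ _ _).mpr ⟨S, hS', hne, hT⟩)
      · simp only [solTakeLoop] at hT
        by_cases hle : PySem.List.pyGetD info z 0 + 1 ≤ rem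
        · rw [if_neg (by omega)] at hT
          refine List.mem_append_right _ ?_
          rw [if_pos hle]
          exact (ih _ _ _).mpr ⟨r, hr, Or.inl rfl, hT⟩
        · rw [if_pos (by omega)] at hT
          simp at hT

theorem mem_LallL (S : List Int) :
    S ∈ LallL ↔ S.Sublist (PySem.List.pyRange 0 11 1) ∧ S ≠ [] := by
  unfold LallL
  rw [List.mem_flatMap]
  constructor
  · rintro ⟨i, hi, hS⟩
    rw [PySem.List.mem_pyRange_one] at hi
    obtain ⟨hsub, hlen⟩ := (PySem.List.mem_combinations_iff _ _ _).mp hS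
    refine ⟨hsub, fun hnil => ?_⟩
    rw [hnil] at hlen
    simp at hlen
    omega
  · rintro ⟨hsub, hne⟩
    have hlen11 : S.length ≤ 11 := by
      have h := hsub.length_le
      rw [PySem.List.length_pyRange_one] at h
      omega
    have hpos : 0 < S.length := List.length_pos_iff.mpr hne
    refine ⟨(S.length : Int), ?_, ?_⟩
    · rw [PySem.List.mem_pyRange_one]
      constructor <;> [exact_mod_cast hpos; exact_mod_cast Nat.lt_succ_of_le hlen11]
    · rw [PySem.List.mem_combinations_iff]
      exact ⟨hsub, by simp⟩

theorem solStep_eq (n : Int) (info : List Int) (st : List (List Int × Int) × Int) (S : List Int) :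
    solStep n info st S =
      match candOf n info S with
      | none => st
      | some c => if st.2 ≤ c.2 then (st.1 ++ [c], c.2) else st := by
  unfold solStep candOf candLeaf fixRes
  simp only []
  split_ifs <;> first | rfl | simp_all | (exfalso; omega)

theorem candOf_pos (n : Int) (info : List Int) (S : List Int) (c : List Int × Int)
    (h : candOf n info S = some c) : 1 ≤ c.2 := by
  unfold candOf candLeaf at h
  split at h
  · split at h
    · simp only [Option.some.injEq] at h
      subst h
      simp only []
      omega
    · exact absurd h (by simp)
  · exact absurd h (by simp)

theorem candOf_of_leaf (n : Int) (info : List Int) (S : List Int) (rem : Int) (res : List Int)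
    (h : solTakeLoop info S n (List.replicate 11 0) = (rem, res, true)) :
    candOf n info S = candLeaf info rem res := by
  unfold candOf
  rw [h]
  simp

-- the A-side loop only appends
theorem foldA_mono (n : Int) (info : List Int) (L : List (List Int))
    (st : List (List Int × Int) × Int) (x : List Int × Int) (hx : x ∈ st.1) :
    x ∈ (L.foldl (solStep n info) st).1 := by
  induction L generalizing st with
  | nil => exact hx
  | cons S L ih =>
    rw [List.foldl_cons]
    apply ih
    rw [solStep_eq]
    cases h : candOf n info S with
    | none => exact hx
    | some c =>
      simp only []
      split_ifs
      · exact List.mem_append_left _ hx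
      · exact hx

-- everything the A-side loop holds is a candidate
theorem foldA_sub (n : Int) (info : List Int) (L : List (List Int))
    (st : List (List Int × Int) × Int) :
    ∀ x ∈ (L.foldl (solStep n info) st).1, x ∈ st.1 ∨ ∃ S ∈ L, candOf n info S = some x := by
  induction L generalizing st with
  | nil => exact fun x hx => Or.inl hx
  | cons S L ih =>
    intro x hx
    rw [List.foldl_cons] at hx
    rcases ih (solStep n info st S) x hx with h | ⟨S', hS', hc⟩
    · rw [solStep_eq] at h
      rcases hc : candOf n info S with _ | c
      · rw [hc] at h
        exact Or.inl h
      · rw [hc] at h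
        simp only [] at h
        split_ifs at h
        · rcases List.mem_append.mp h with h' | h'
          · exact Or.inl h'
          · refine Or.inr ⟨S, List.mem_cons_self, ?_⟩
            rw [hc, List.mem_singleton.mp h']
        · exact Or.inl h
    · exact Or.inr ⟨S', List.mem_cons_of_mem _ hS', hc⟩

-- a candidate of maximal margin survives A's running max_point filter
theorem foldA_max (n : Int) (info : List Int) (L : List (List Int))
    (st : List (List Int × Int) × Int) (c : List Int × Int)
    (hmax : ∀ S' ∈ L, ∀ c', candOf n info S' = some c' → c'.2 ≤ c.2)
    (hmp : st.2 ≤ c.2) (hS : ∃ S ∈ L, candOf n info S = some c) :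
    c ∈ (L.foldl (solStep n info) st).1 := by
  induction L generalizing st with
  | nil => simp at hS
  | cons S0 L ih =>
    rw [List.foldl_cons]
    rcases hS with ⟨S, hSmem, hSc⟩
    rcases List.mem_cons.mp hSmem with rfl | hSL
    · -- the head produces c; it is appended and then persists
      apply foldA_mono
      rw [solStep_eq, hSc]
      simp only []
      rw [if_pos hmp]
      exact List.mem_append_right _ (List.mem_singleton.mpr rfl)
    · -- c comes later; the new max_point still allows it
      apply ih
      · exact fun S' hS' c' hc' => hmax S' (List.mem_cons_of_mem _ hS') c' hc'
      · rw [solStep_eq]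
        rcases h0 : candOf n info S0 with _ | c0
        · exact hmp
        · simp only []
          split_ifs
          · exact hmax S0 List.mem_cons_self c0 h0
          · exact hmp
      · exact ⟨S, hSL, hSc⟩

-- the B-side running best: none iff no candidate at all
theorem foldB_none (info : List Int) (L : List (Int × List Int))
    (best : Option ((Int × List Int) × List Int)) :
    L.foldl (fun b l => altLeaf info l.1 l.2 b) best = none ↔
      best = none ∧ ∀ l ∈ L, candLeaf info l.1 l.2 = none := by
  induction L generalizing best with
  | nil => simp
  | cons l0 L ih =>
    rw [List.foldl_cons, ih, altLeaf_eq]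
    rcases hc : candLeaf info l0.1 l0.2 with _ | c
    · simp [List.forall_mem_cons, hc]
    · rcases best with _ | b
      · simp [hc]
      · simp only []
        split_ifs <;> simp [List.forall_mem_cons, hc]

-- the B-side running best is a candidate of maximal key
theorem foldB_some (info : List Int) (L : List (Int × List Int))
    (best : Option ((Int × List Int) × List Int)) (x : (Int × List Int) × List Int)
    (hr : L.foldl (fun b l => altLeaf info l.1 l.2 b) best = some x) :
    (best = some x ∨ ∃ l ∈ L, ∃ c, candLeaf info l.1 l.2 = some c ∧ x = liftC c) ∧
    (∀ y, best = some y → toLex y.1 ≤ toLex x.1) ∧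
    (∀ l ∈ L, ∀ c, candLeaf info l.1 l.2 = some c → keyC c ≤ toLex x.1) := by
  induction L generalizing best with
  | nil =>
    simp only [List.foldl_nil] at hr
    refine ⟨Or.inl hr, fun y hy => ?_, by simp⟩
    rw [hy] at hr
    rw [Option.some.injEq] at hr
    rw [hr]
  | cons l0 L ih =>
    rw [List.foldl_cons] at hr
    obtain ⟨H1, H2, H3⟩ := ih (altLeaf info l0.1 l0.2 best) hr
    -- how the head leaf transforms the running best
    have hstep : ∀ y, best = some y →
        ∃ z, altLeaf info l0.1 l0.2 best = some z ∧ toLex y.1 ≤ toLex z.1 := by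
      intro y hy
      rw [altLeaf_eq, hy]
      rcases hc : candLeaf info l0.1 l0.2 with _ | c
      · exact ⟨y, rfl, le_refl _⟩
      · simp only []
        split_ifs with hlt
        · exact ⟨liftC c, rfl, le_of_lt hlt⟩
        · exact ⟨y, rfl, le_refl _⟩
    have hcand : ∀ c, candLeaf info l0.1 l0.2 = some c →
        ∃ z, altLeaf info l0.1 l0.2 best = some z ∧ keyC c ≤ toLex z.1 := by
      intro c hc
      rw [altLeaf_eq, hc]
      rcases best with _ | b
      · exact ⟨liftC c, rfl, le_refl _⟩
      · simp only []
        split_ifs with hlt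
        · exact ⟨liftC c, rfl, le_refl _⟩
        · exact ⟨b, rfl, le_of_not_gt hlt⟩
    refine ⟨?_, ?_, ?_⟩
    · rcases H1 with h | ⟨l, hl, c, hc, hx⟩
      · rw [altLeaf_eq] at h
        rcases hc : candLeaf info l0.1 l0.2 with _ | c
        · rw [hc] at h
          exact Or.inl h
        · rw [hc] at h
          rcases best with _ | b
          · simp only [Option.some.injEq] at h
            exact Or.inr ⟨l0, List.mem_cons_self, c, hc, h.symm⟩
          · simp only [] at h
            split_ifs at h <;> rw [Option.some.injEq] at h
            · exact Or.inr ⟨l0, List.mem_cons_self, c, hc, h.symm⟩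
            · exact Or.inl (by rw [h])
      · exact Or.inr ⟨l, List.mem_cons_of_mem _ hl, c, hc, hx⟩
    · intro y hy
      obtain ⟨z, hz, hle⟩ := hstep y hy
      exact le_trans hle (H2 z hz)
    · intro l hl c hc
      rcases List.mem_cons.mp hl with rfl | hl'
      · obtain ⟨z, hz, hle⟩ := hcand c hc
        exact le_trans hle (H2 z hz)
      · exact H3 l hl' c hc

-- flatten A's nested loops
theorem foldl_flatMap' {α β σ : Type} (l : List α) (g : α → List β) (f : σ → β → σ) (init : σ) :
    l.foldl (fun st i => (g i).foldl f st) init = (l.flatMap g).foldl f init := by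
  induction l generalizing init with
  | nil => rfl
  | cons x xs ih => simp [List.foldl_cons, List.flatMap_cons, List.foldl_append, ih]

theorem keyC_fst_le {c c' : List Int × Int} (h : keyC c' ≤ keyC c) : c'.2 ≤ c.2 := by
  unfold keyC at h
  rcases Prod.Lex.le_iff.mp h with h1 | ⟨h1, _⟩
  · exact le_of_lt h1
  · exact le_of_eq h1

theorem keyC_inj {c c' : List Int × Int} (h : keyC c = keyC c') : c.1 = c'.1 := by
  unfold keyC at h
  rw [toLex_inj, Prod.mk.injEq] at h
  exact List.reverse_inj.mp h.2

theorem solution_eq (n : Int) (info : List Int) :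
    solution n info =
      match PySem.List.sorted (LallL.foldl (solStep n info) ([], 0)).1
          (fun x => toLex (x.2, x.1.reverse)) true with
      | [] => [-1]
      | a :: _ => a.1 := by
  unfold solution LallL
  rw [foldl_flatMap']

theorem solution_alt_eq (n : Int) (info : List Int) :
    solution_alt n info =
      match (leavesRec info (PySem.List.pyRange 0 11 1) n (List.replicate 11 0) false).foldl
          (fun b l => altLeaf info l.1 l.2 b) none with
      | some b => b.2
      | none => [-1] := by
  unfold solution_alt
  rw [dfs_eq_foldl]

-- the two enumerations produce exactly the same winning candidates
theorem cand_iff (n : Int) (info : List Int) (c : List Int × Int) :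
    (∃ l ∈ leavesRec info (PySem.List.pyRange 0 11 1) n (List.replicate 11 0) false,
        candLeaf info l.1 l.2 = some c) ↔
      ∃ S ∈ LallL, candOf n info S = some c := by
  constructor
  · rintro ⟨⟨rem, res⟩, hl, hc⟩
    obtain ⟨S, hS, hne, hT⟩ := (mem_leaves _ _ _ _ _ _ _).mp hl
    have hco : candOf n info S = some c := by
      rw [candOf_of_leaf _ _ _ _ _ hT]
      exact hc
    rcases hne with hne | hne
    · simp at hne
    · exact ⟨S, (mem_LallL S).mpr ⟨hS, hne⟩, hco⟩
  · rintro ⟨S, hS, hc⟩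
    obtain ⟨hsub, hne⟩ := (mem_LallL S).mp hS
    rcases hT : solTakeLoop info S n (List.replicate 11 0) with ⟨rem, res, ok⟩
    rcases ok with _ | _
    · exfalso
      unfold candOf at hc
      rw [hT] at hc
      exact absurd hc (by simp)
    · refine ⟨(rem, res), (mem_leaves _ _ _ _ _ _ _).mpr ⟨S, hsub, Or.inr hne, hT⟩, ?_⟩
      rw [← candOf_of_leaf _ _ _ _ _ hT]
      exact hc

-- ===== VERDICT (by name: the statement is the Claim_ definition above) =====
theorem solution_spec : Claim_equal_solution := by
  unfold Claim_equal_solution Spec_solution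
  intro n info _hdom _hpre
  rw [solution_eq, solution_alt_eq]
  rcases hr : (leavesRec info (PySem.List.pyRange 0 11 1) n (List.replicate 11 0) false).foldl
      (fun b l => altLeaf info l.1 l.2 b) none with _ | x
  · -- no winning candidate anywhere: both return [-1]
    obtain ⟨_, hall⟩ := (foldB_none _ _ _).mp hr
    have hans : (LallL.foldl (solStep n info) ([], 0)).1 = [] := by
      rw [List.eq_nil_iff_forall_not_mem]
      intro x hx
      rcases foldA_sub n info LallL ([], 0) x hx with h | hA
      · simp at h
      · obtain ⟨l, hl, hc⟩ := (cand_iff n info x).mpr hA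
        rw [hall l hl] at hc
        exact absurd hc (by simp)
    rw [hans, hr, (PySem.List.sorted_eq_nil_iff _ _ _).mpr rfl]
  · -- B found a best x; A's sorted head agrees
    obtain ⟨Hmem, _, Hmax⟩ := foldB_some _ _ _ _ hr
    rcases Hmem with h | ⟨l, hl, c, hc, rfl⟩
    · exact absurd h (by simp)
    have hcA := (cand_iff n info c).mp ⟨l, hl, hc⟩
    have hcCL : c ∈ LallL.filterMap (candOf n info) := List.mem_filterMap.mpr hcA
    rcases hm : PySem.List.max? (LallL.filterMap (candOf n info)) keyC with _ | cmax
    · rw [PySem.List.max?_eq_none_iff] at hm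
      rw [hm] at hcCL
      simp at hcCL
    have hcmaxmax := PySem.List.max?_isMax hm
    obtain ⟨S₀, hS₀, hc₀⟩ := List.mem_filterMap.mp (PySem.List.max?_mem hm)
    have hcmaxA : cmax ∈ (LallL.foldl (solStep n info) ([], 0)).1 :=
      foldA_max n info LallL ([], 0) cmax
        (fun S' hS' c' hc' =>
          keyC_fst_le (hcmaxmax c' (List.mem_filterMap.mpr ⟨S', hS', hc'⟩)))
        (by
          have := candOf_pos _ _ _ _ hc₀
          omega)
        ⟨S₀, hS₀, hc₀⟩
    rcases hsorted : PySem.List.sorted (LallL.foldl (solStep n info) ([], 0)).1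
        (fun x => toLex (x.2, x.1.reverse)) true with _ | ⟨m, t⟩
    · rw [PySem.List.sorted_eq_nil_iff] at hsorted
      rw [hsorted] at hcmaxA
      simp at hcmaxA
    rw [hr]
    have hmmem : m ∈ (LallL.foldl (solStep n info) ([], 0)).1 := by
      rw [← PySem.List.mem_sorted _ (fun x => toLex (x.2, x.1.reverse)) true, hsorted]
      exact List.mem_cons_self
    have hmmax : ∀ y ∈ (LallL.foldl (solStep n info) ([], 0)).1, keyC y ≤ keyC m :=
      PySem.List.key_head_sorted_rev_ge _ _ hsorted
    have hmCL : ∃ S ∈ LallL, candOf n info S = some m := by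
      rcases foldA_sub n info LallL ([], 0) m hmmem with h | h
      · simp at h
      · exact h
    obtain ⟨lm, hlm, hcm⟩ := (cand_iff n info m).mpr hmCL
    have h1 : keyC m ≤ keyC c := Hmax lm hlm m hcm
    have h2 : keyC c ≤ keyC m :=
      le_trans (hcmaxmax c hcCL) (hmmax cmax hcmaxA)
    have := keyC_inj (le_antisymm h1 h2)
    simpa [liftC] using this
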